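-- pv_equiv track=rewrite | github.com/Sallaient/flowshop_scheduling | flowshop.py | makespan_probleme_1_rj_cmax
-- ===== SOURCE A (Python) =====
-- def makespan_probleme_1_rj_cmax(dates_au_plus_tot, durées_jobs):
--     '''
--     Fonction annexe qui renvoie le makespan pour le problème 1|rj|Cmax
--     Utilisée dans la fonction eval
--     '''
--     if dates_au_plus_tot.__len__ == 0 or durées_jobs.__len__ == 0:
--         return -1
--
--     makespan = 0
--     for i in range(len(durées_jobs)):
--
--         if makespan >= dates_au_plus_tot[i]:    # pas besoin d'attendre
--             makespan += durées_jobs[i]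
--         else:                                   # il faut attendre
--             makespan = dates_au_plus_tot[i] + durées_jobs[i]
--
--     return makespan
-- ===== SOURCE B (Python) =====
-- def makespan_probleme_1_rj_cmax(dates_au_plus_tot, durées_jobs):
--     '''
--     Makespan for 1|rj|Cmax via the identity
--     Cmax = max(total processing time, max_i (r_i + remaining processing time from i)).
--     '''
--     suffix = []
--     acc = 0
--     for d in reversed(durées_jobs):
--         acc += d
--         suffix.append(acc)
--     suffix.reverse()
--     best = acc
--     for i in range(len(durées_jobs)):
--         c = dates_au_plus_tot[i] + suffix[i]
--         if c > best:
--             best = c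
--     return best
-- ===== Notes on version B (the rewrite author's own statement) =====
-- stated objective: alternative
-- what changed: Replaces the sequential max-then-add recurrence by a closed-form computation: build suffix sums of the durations in a backward pass, then take the maximum of total processing time and r_i + suffix_i over all i.
import Mathlib
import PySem

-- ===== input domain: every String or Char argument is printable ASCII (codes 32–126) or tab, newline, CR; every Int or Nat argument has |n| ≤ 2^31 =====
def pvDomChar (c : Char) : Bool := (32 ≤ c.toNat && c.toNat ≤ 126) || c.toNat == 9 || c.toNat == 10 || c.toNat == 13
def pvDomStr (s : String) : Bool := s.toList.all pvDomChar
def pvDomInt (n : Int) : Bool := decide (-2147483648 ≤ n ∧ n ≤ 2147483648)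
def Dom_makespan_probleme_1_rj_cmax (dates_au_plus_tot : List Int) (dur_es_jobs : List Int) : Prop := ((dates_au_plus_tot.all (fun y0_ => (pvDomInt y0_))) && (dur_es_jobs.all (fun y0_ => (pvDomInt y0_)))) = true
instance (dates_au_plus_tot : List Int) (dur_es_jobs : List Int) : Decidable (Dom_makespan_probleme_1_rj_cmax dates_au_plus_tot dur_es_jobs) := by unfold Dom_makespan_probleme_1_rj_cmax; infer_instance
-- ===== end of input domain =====

-- B computes the same makespan by a different decomposition: suffix sums of the durations,
-- then the maximum of (total processing time) and (r_i + remaining work from i).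

-- ===== PORT A =====
-- Note: A's guard `dates_au_plus_tot.__len__ == 0 or durées_jobs.__len__ == 0` compares a bound
-- method with 0 and is therefore always False in Python; the `return -1` branch is dead code
-- and is not ported.
def makespan_probleme_1_rj_cmax (dates_au_plus_tot : List Int) (dur_es_jobs : List Int) : Int :=
  (PySem.List.pyRange 0 (PySem.List.len dur_es_jobs) 1).foldl
    (fun makespan i =>
      if makespan ≥ PySem.List.pyGetD dates_au_plus_tot i 0 then
        makespan + PySem.List.pyGetD dur_es_jobs i 0
      else
        PySem.List.pyGetD dates_au_plus_tot i 0 + PySem.List.pyGetD dur_es_jobs i 0)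
    0

-- ===== PORT B =====
def makespan_probleme_1_rj_cmax_alt (dates_au_plus_tot : List Int) (dur_es_jobs : List Int) : Int :=
  -- backward pass: suffix.append(acc + d); then suffix.reverse()
  let st := dur_es_jobs.reverse.foldl
    (fun (st : Int × List Int) d => (st.1 + d, st.2 ++ [st.1 + d])) (0, [])
  let suffix := st.2.reverse
  let best := st.1
  (PySem.List.pyRange 0 (PySem.List.len dur_es_jobs) 1).foldl
    (fun best i =>
      let c := PySem.List.pyGetD dates_au_plus_tot i 0 + PySem.List.pyGetD suffix i 0
      if c > best then c else best)
    best

-- ===== PRECONDITION & SPEC =====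
-- Pre_ excludes exactly the inputs where durées_jobs is longer than dates_au_plus_tot:
-- there both A and B raise IndexError (dates_au_plus_tot[i] out of range).
def Pre_makespan_probleme_1_rj_cmax (dates_au_plus_tot : List Int) (dur_es_jobs : List Int) : Prop :=
  dur_es_jobs.length ≤ dates_au_plus_tot.length
instance (dates_au_plus_tot : List Int) (dur_es_jobs : List Int) : Decidable (Pre_makespan_probleme_1_rj_cmax dates_au_plus_tot dur_es_jobs) := by unfold Pre_makespan_probleme_1_rj_cmax; infer_instance

def pvWitness_makespan_probleme_1_rj_cmax : List Int × List Int := ([1, 0, 7], [3, 4, 2])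

def Spec_makespan_probleme_1_rj_cmax (dates_au_plus_tot : List Int) (dur_es_jobs : List Int) (out : Int) : Prop := out = makespan_probleme_1_rj_cmax_alt dates_au_plus_tot dur_es_jobs
instance (dates_au_plus_tot : List Int) (dur_es_jobs : List Int) (out : Int) : Decidable (Spec_makespan_probleme_1_rj_cmax dates_au_plus_tot dur_es_jobs out) := by unfold Spec_makespan_probleme_1_rj_cmax; infer_instance

-- ===== CLAIM (what is proved, stated in full; the proofs are below) =====
def Claim_equal_makespan_probleme_1_rj_cmax : Prop := ∀ (dates_au_plus_tot : List Int) (dur_es_jobs : List Int), Dom_makespan_probleme_1_rj_cmax dates_au_plus_tot dur_es_jobs → Pre_makespan_probleme_1_rj_cmax dates_au_plus_tot dur_es_jobs → Spec_makespan_probleme_1_rj_cmax dates_au_plus_tot dur_es_jobs (makespan_probleme_1_rj_cmax dates_au_plus_tot dur_es_jobs)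

-- ===== LEMMAS AND PROOFS =====

-- abstract two-list index loop: go2 F r q m runs m := F m r_i q_i for i = 0 .. |q|-1
def pvGo2 (F : Int → Int → Int → Int) : List Int → List Int → Int → Int
  | a :: r, b :: q, m => pvGo2 F r q (F m a b)
  | _, _, m => m

-- structural suffix sums: pvSfx p = [sum p[0:], sum p[1:], …]
def pvSfx : List Int → List Int
  | [] => []
  | a :: p => (p.sum + a) :: pvSfx p

theorem pvSfx_length (p : List Int) : (pvSfx p).length = p.length := by
  induction p with
  | nil => rfl
  | cons a p ih => simp [pvSfx, ih]

theorem pvBuild (p : List Int) : ∀ (acc : Int) (l : List Int),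
    p.reverse.foldl (fun (st : Int × List Int) d => (st.1 + d, st.2 ++ [st.1 + d])) (acc, l)
      = (acc + p.sum, l ++ ((pvSfx p).map (fun s => s + acc)).reverse) := by
  induction p with
  | nil => simp [pvSfx]
  | cons a p ih =>
    intro acc l
    simp only [List.reverse_cons, List.foldl_append, ih, List.foldl_cons, List.foldl_nil,
      pvSfx, List.map, List.reverse_cons, List.sum_cons]
    rw [show acc + (a + p.sum) = acc + p.sum + a by ring,
        show p.sum + a + acc = acc + p.sum + a by ring, List.append_assoc]

theorem pvGo2_snoc (F : Int → Int → Int → Int) :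
    ∀ (q r : List Int) (b acc : Int), q.length < r.length →
    pvGo2 F r (q ++ [b]) acc = F (pvGo2 F r q acc) (r.getD q.length 0) b := by
  intro q
  induction q with
  | nil =>
    intro r b acc h
    match r with
    | a :: r' => simp [pvGo2]
  | cons c q' ih =>
    intro r b acc h
    match r with
    | a :: r' =>
      simp only [List.cons_append, pvGo2]
      rw [ih r' b (F acc a c) (by simpa using h)]
      simp

theorem pvFold_eq_go2 (F : Int → Int → Int → Int) (r : List Int) :
    ∀ (q : List Int) (acc : Int), q.length ≤ r.length →
    (PySem.List.pyRange 0 (q.length : Int) 1).foldl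
      (fun m i => F m (PySem.List.pyGetD r i 0) (PySem.List.pyGetD q i 0)) acc
      = pvGo2 F r q acc := by
  intro q
  induction q using List.reverseRecOn with
  | nil => intro acc h; simp [PySem.List.pyRange_one_eq_nil, pvGo2]
  | append_singleton q' b ih =>
    intro acc h
    have hlen : ((q' ++ [b]).length : Int) = (q'.length : Int) + 1 := by simp
    rw [hlen, PySem.List.pyRange_one_succ_right (by positivity), List.foldl_append]
    have hq' : q'.length ≤ r.length := by simp at h; omega
    have hcongr : (PySem.List.pyRange 0 (q'.length : Int) 1).foldl
        (fun m i => F m (PySem.List.pyGetD r i 0) (PySem.List.pyGetD (q' ++ [b]) i 0)) acc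
        = (PySem.List.pyRange 0 (q'.length : Int) 1).foldl
        (fun m i => F m (PySem.List.pyGetD r i 0) (PySem.List.pyGetD q' i 0)) acc := by
      apply PySem.List.foldl_congr_mem
      intro m i hi
      rw [PySem.List.mem_pyRange_one] at hi
      obtain ⟨k, hk⟩ : ∃ k : Nat, i = (k : Int) := ⟨i.toNat, by omega⟩
      have hklt : k < q'.length := by omega
      simp [List.getD, List.getElem?_append_left hklt, hk]
    rw [hcongr, ih acc hq']
    simp only [List.foldl_cons, List.foldl_nil]
    rw [pvGo2_snoc F q' r b acc (by simp at h; omega)]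
    have h1 : PySem.List.pyGetD r ((q'.length : Int)) 0 = r.getD q'.length 0 := by simp
    have h2 : PySem.List.pyGetD (q' ++ [b]) ((q'.length : Int)) 0 = b := by
      simp [List.getD]
    rw [h1, h2]

theorem pvCore (p : List Int) :
    ∀ (r : List Int) (m : Int), p.length ≤ r.length →
    pvGo2 (fun m a b => if m ≥ a then m + b else a + b) r p m
      = pvGo2 (fun best a c => if a + c > best then a + c else best) r (pvSfx p) (m + p.sum) := by
  induction p with
  | nil => intro r m h; cases r <;> simp [pvGo2, pvSfx]
  | cons b p' ih =>
    intro r m h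
    match r with
    | a :: r' =>
      simp only [pvSfx, pvGo2, List.sum_cons]
      rw [ih r' (if m ≥ a then m + b else a + b) (by simpa using h)]
      congr 1
      split_ifs <;> omega

-- ===== VERDICT (by name: the statement is the Claim_ definition above) =====
theorem makespan_probleme_1_rj_cmax_spec : Claim_equal_makespan_probleme_1_rj_cmax := by
  intro r p _ hpre
  unfold Spec_makespan_probleme_1_rj_cmax
  unfold makespan_probleme_1_rj_cmax makespan_probleme_1_rj_cmax_alt
  have hbuild := pvBuild p 0 []
  simp only [PySem.List.len_eq, hbuild, zero_add, List.nil_append]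
  have hmap : (pvSfx p).map (fun s => s + 0) = pvSfx p := by simp
  simp only [hmap, List.reverse_reverse]
  have hA := pvFold_eq_go2 (fun m a b => if m ≥ a then m + b else a + b) r p 0 hpre
  have hlen : (p.length : Int) = ((pvSfx p).length : Int) := by rw [pvSfx_length]
  have hB := pvFold_eq_go2 (fun best a c => if a + c > best then a + c else best) r
    (pvSfx p) p.sum (by rw [pvSfx_length]; exact hpre)
  simp only at hA hB
  rw [hA, hlen, hB]
  have := pvCore p r 0 hpre
  simpa using this
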